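-- pv_equiv track=rewrite | github.com/palakala/Python-Programming | Stacks/infixToPrefix.py | rev_exp
-- ===== SOURCE A (Python) =====
-- def rev_exp(expr):
--     revexpr = ''
--     for i in expr:
--         if i == '(':
--             i = ')'
--         elif i ==')':
--             i ='('
--         revexpr = i + revexpr
--     return revexpr
-- ===== SOURCE B (Python) =====
-- _TABLE = str.maketrans('()', ')(')
--
-- def rev_exp(expr):
--     return expr.translate(_TABLE)[::-1]
-- ===== Notes on version B (the rewrite author's own statement) =====
-- stated objective: faster
-- what changed: Replaces the explicit per-character loop with if/elif branching and front-prepend accumulation by a one-shot translation table applied via str.translate followed by a [::-1] slice reversal.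
import Mathlib
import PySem

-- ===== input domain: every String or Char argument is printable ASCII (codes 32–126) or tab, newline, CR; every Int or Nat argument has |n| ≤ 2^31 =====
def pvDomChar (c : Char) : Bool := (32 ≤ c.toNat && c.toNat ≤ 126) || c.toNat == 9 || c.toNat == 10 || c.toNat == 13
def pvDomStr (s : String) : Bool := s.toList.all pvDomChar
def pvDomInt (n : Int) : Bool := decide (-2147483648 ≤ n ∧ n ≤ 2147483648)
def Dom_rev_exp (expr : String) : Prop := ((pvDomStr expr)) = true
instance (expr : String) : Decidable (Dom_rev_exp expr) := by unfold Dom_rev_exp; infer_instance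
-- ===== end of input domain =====

-- B replaces A's per-character if/elif loop with prepend accumulation by a
-- translation table applied in one pass followed by a slice reversal (idiomatic).

-- ===== PORT A =====
-- A: loop over chars, swap parens by if/elif, prepend to the accumulator string.
def rev_exp (expr : String) : String :=
  expr.toList.foldl
    (fun revexpr i =>
      let i := if i = '(' then ')' else if i = ')' then '(' else i
      String.mk (i :: revexpr.toList))
    ""

-- ===== PORT B =====
-- B: translation table (maketrans '()' -> ')(' as an association list; chars not
-- in the table are unchanged), applied char-by-char, then reversed ([::-1]).
def pvTable : List (Char × Char) := [('(', ')'), (')', '(')]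

def rev_exp_alt (expr : String) : String :=
  String.mk ((expr.toList.map (fun c => (pvTable.lookup c).getD c)).reverse)

-- ===== PRECONDITION & SPEC =====
def Spec_rev_exp (expr : String) (out : String) : Prop := out = rev_exp_alt expr
instance (expr : String) (out : String) : Decidable (Spec_rev_exp expr out) := by unfold Spec_rev_exp; infer_instance

-- ===== CLAIM (what is proved, stated in full; the proofs are below) =====
def Claim_equal_rev_exp : Prop := ∀ (expr : String), Dom_rev_exp expr → Spec_rev_exp expr (rev_exp expr)

-- ===== LEMMAS AND PROOFS =====

theorem pv_swap_eq (c : Char) :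
    (if c = '(' then ')' else if c = ')' then '(' else c)
      = (pvTable.lookup c).getD c := by
  by_cases h1 : c = '('
  · subst h1; decide
  · by_cases h2 : c = ')'
    · subst h2; decide
    · have h1' : (c == '(') = false := by simp [h1]
      have h2' : (c == ')') = false := by simp [h2]
      simp [pvTable, List.lookup, h1, h2, h1', h2']

theorem pv_fold_eq (l : List Char) : ∀ (acc : String),
    l.foldl
      (fun revexpr i =>
        let i := if i = '(' then ')' else if i = ')' then '(' else i
        String.mk (i :: revexpr.toList))
      acc
    = String.mk ((l.map (fun c => (pvTable.lookup c).getD c)).reverse ++ acc.toList) := by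
  induction l with
  | nil => intro acc; simp [String.mk]
  | cons x l ih =>
      intro acc
      simp only [List.foldl_cons, List.map_cons, List.reverse_cons]
      rw [ih]
      simp [pv_swap_eq, String.mk]

-- ===== VERDICT (by name: the statement is the Claim_ definition above) =====
theorem rev_exp_spec : Claim_equal_rev_exp := by
  intro expr _
  unfold Spec_rev_exp rev_exp rev_exp_alt
  rw [pv_fold_eq]
  simp
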